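-- pv_equiv track=rewrite | github.com/cofemei/fcitx5-whispercpp | tools/configure_fcitx5.py | ensure_key
-- ===== SOURCE A (Python) =====
-- def find_section(lines: list[str], section: str) -> tuple[int, int]:
--     """Return (section_start, section_end) indices, or (-1, len(lines)) if not found."""
--     header = f"[{section}]"
--     section_start = -1
--     section_end = len(lines)
--     for i, line in enumerate(lines):
--         if line.strip() == header:
--             section_start = i
--             break
--     if section_start >= 0:
--         for i in range(section_start + 1, len(lines)):
--             if lines[i].startswith("[") and lines[i].endswith("]"):
--                 section_end = i
--                 break
--     return section_start, section_end
--
-- def ensure_key(lines: list[str], section: str, key: str, value: str) -> list[str]: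
--     header = f"[{section}]"
--     key_prefix = f"{key}="
--     section_start, section_end = find_section(lines, section)
--
--     if section_start == -1:
--         if lines and lines[-1].strip():
--             lines.append("")
--         lines.extend([header, f"{key_prefix}{value}"])
--         return lines
--
--     for i in range(section_start + 1, section_end):
--         stripped = lines[i].strip()
--         if stripped.startswith(key_prefix):
--             lines[i] = f"{key_prefix}{value}"
--             return lines
--
--     lines.insert(section_end, f"{key_prefix}{value}")
--     return lines
-- ===== SOURCE B (Python) =====
-- def ensure_key(lines: list[str], section: str, key: str, value: str) -> list[str]:
--     header = f"[{section}]"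
--     key_prefix = f"{key}="
--     kv = f"{key_prefix}{value}"
--     in_section = False
--     for i, line in enumerate(lines):
--         if in_section:
--             if line.startswith("[") and line.endswith("]"):
--                 lines.insert(i, kv)
--                 return lines
--             if line.strip().startswith(key_prefix):
--                 lines[i] = kv
--                 return lines
--         elif line.strip() == header:
--             in_section = True
--     if in_section:
--         lines.append(kv)
--         return lines
--     if lines and lines[-1].strip():
--         lines.append("")
--     lines.extend([header, kv])
--     return lines
-- ===== Notes on version B (the rewrite author's own statement) =====
-- stated objective: simpler
-- what changed: Replaces A's find_section helper plus two index-range loops (each rescanning the list by position) with a single left-to-right pass over the lines carrying an in_section flag, handling overwrite, insert-before-next-section and the two append cases as the pass's outcomes.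
import Mathlib
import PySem

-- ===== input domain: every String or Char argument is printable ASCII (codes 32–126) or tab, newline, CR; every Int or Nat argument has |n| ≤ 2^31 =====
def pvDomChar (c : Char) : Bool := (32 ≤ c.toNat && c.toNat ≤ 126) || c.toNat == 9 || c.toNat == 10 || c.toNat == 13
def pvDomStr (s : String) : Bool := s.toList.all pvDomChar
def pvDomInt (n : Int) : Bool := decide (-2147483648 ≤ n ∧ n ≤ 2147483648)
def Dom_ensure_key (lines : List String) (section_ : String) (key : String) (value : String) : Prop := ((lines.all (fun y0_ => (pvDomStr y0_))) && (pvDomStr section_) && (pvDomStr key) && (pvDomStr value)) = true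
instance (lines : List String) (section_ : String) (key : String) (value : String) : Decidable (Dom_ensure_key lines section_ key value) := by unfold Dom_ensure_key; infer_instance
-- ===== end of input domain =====

-- B replaces A's two-helper index scanning (find_section + two index loops) by one structural
-- left-to-right pass with an in_section flag (objective: simpler decomposition, same cost).
-- A mutates `lines` in place (set/insert/append); the equivalence proved here is about the
-- RETURN value only (B performs the same mutations in Python).

-- ===== PORT A =====
-- first loop of find_section: enumerate, return index of first line whose strip() == header
def fsFirst (lines : List String) (header : String) (i : Nat) : Option Nat :=
  match lines with
  | [] => none
  | l :: ls => if PySem.Str.strip l == header then some i else fsFirst ls header (i + 1)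

-- second loop of find_section: for i in range(start+1, len(lines)): first raw "["…"]" line
def fsEnd (lines : List String) (i : Nat) : Option Nat :=
  if hlt : i < lines.length then
    if PySem.Str.startswith (lines.getD i "") "[" && PySem.Str.endswith (lines.getD i "") "]" then
      some i
    else fsEnd lines (i + 1)
  else none
termination_by lines.length - i

def find_section (lines : List String) (section_ : String) : Int × Int :=
  let header := "[" ++ section_ ++ "]"
  let section_start : Int :=
    match fsFirst lines header 0 with
    | some i => (i : Int)
    | none => -1
  let section_end : Int :=
    if 0 ≤ section_start then
      match fsEnd lines (section_start.toNat + 1) with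
      | some i => (i : Int)
      | none => (lines.length : Int)
    else (lines.length : Int)
  (section_start, section_end)

-- the key-overwriting loop of ensure_key: for i in range(section_start+1, section_end)
def ekScan (lines : List String) (kp kv : String) (i stop : Nat) : Option (List String) :=
  if hlt : i < stop then
    if PySem.Str.startswith (PySem.Str.strip (lines.getD i "")) kp then
      some (lines.set i kv)
    else ekScan lines kp kv (i + 1) stop
  else none
termination_by stop - i

def ensure_key (lines : List String) (section_ : String) (key : String) (value : String) : List String :=
  let header := "[" ++ section_ ++ "]"
  let key_prefix := key ++ "="
  let sse := find_section lines section_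
  let section_start := sse.1
  let section_end := sse.2
  if section_start = -1 then
    let lines' := if lines ≠ [] ∧ PySem.Str.strip (lines.getLast?.getD "") ≠ "" then lines ++ [""] else lines
    lines' ++ [header, key_prefix ++ value]
  else
    match ekScan lines key_prefix (key_prefix ++ value) (section_start.toNat + 1) section_end.toNat with
    | some r => r
    | none => PySem.List.insert lines section_end (key_prefix ++ value)

-- ===== PORT B =====
-- the single pass of Source B: Sum.inl = an early `return lines`; Sum.inr f = loop ended, f = in_section
def bGo (rest : List String) (header kp kv : String) (inSec : Bool) : Sum (List String) Bool :=
  match rest with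
  | [] => Sum.inr inSec
  | l :: ls =>
    if inSec then
      if PySem.Str.startswith l "[" && PySem.Str.endswith l "]" then Sum.inl (kv :: l :: ls)
      else if PySem.Str.startswith (PySem.Str.strip l) kp then Sum.inl (kv :: ls)
      else
        match bGo ls header kp kv true with
        | Sum.inl r => Sum.inl (l :: r)
        | Sum.inr f => Sum.inr f
    else if PySem.Str.strip l == header then
      match bGo ls header kp kv true with
      | Sum.inl r => Sum.inl (l :: r)
      | Sum.inr f => Sum.inr f
    else
      match bGo ls header kp kv false with
      | Sum.inl r => Sum.inl (l :: r)
      | Sum.inr f => Sum.inr f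

def ensure_key_alt (lines : List String) (section_ : String) (key : String) (value : String) : List String :=
  let header := "[" ++ section_ ++ "]"
  let key_prefix := key ++ "="
  let kv := key_prefix ++ value
  match bGo lines header key_prefix kv false with
  | Sum.inl r => r
  | Sum.inr true => lines ++ [kv]
  | Sum.inr false =>
    (if lines ≠ [] ∧ PySem.Str.strip (lines.getLast?.getD "") ≠ "" then lines ++ [""] else lines)
      ++ [header, kv]

-- ===== PRECONDITION & SPEC =====
def Spec_ensure_key (lines : List String) (section_ : String) (key : String) (value : String) (out : List String) : Prop := out = ensure_key_alt lines section_ key value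
instance (lines : List String) (section_ : String) (key : String) (value : String) (out : List String) : Decidable (Spec_ensure_key lines section_ key value out) := by unfold Spec_ensure_key; infer_instance

-- ===== CLAIM (what is proved, stated in full; the proofs are below) =====
def Claim_equal_ensure_key : Prop := ∀ (lines : List String) (section_ : String) (key : String) (value : String), Dom_ensure_key lines section_ key value → Spec_ensure_key lines section_ key value (ensure_key lines section_ key value)

-- ===== LEMMAS AND PROOFS =====

-- split a list at the first element satisfying p (proof-side only)
def split1 (p : String → Bool) : List String → Option (List String × String × List String)
  | [] => none
  | x :: xs =>
    if p x then some ([], x, xs)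
    else (split1 p xs).map (fun y => (x :: y.1, y.2.1, y.2.2))

theorem split1_none {p : String → Bool} : ∀ {xs : List String}, split1 p xs = none → ∀ l ∈ xs, p l = false := by
  intro xs
  induction xs with
  | nil => intro _ l hl; cases hl
  | cons x xs ih =>
    intro hnone l hl
    simp only [split1] at hnone
    cases hpx : p x with
    | true => rw [hpx] at hnone; simp at hnone
    | false =>
      rw [hpx] at hnone
      simp only [Bool.false_eq_true, if_false, Option.map_eq_none_iff] at hnone
      rcases List.mem_cons.mp hl with rfl | hl
      · exact hpx
      · exact ih hnone l hl

theorem split1_some {p : String → Bool} : ∀ {xs a : List String} {h : String} {c : List String},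
    split1 p xs = some (a, h, c) → xs = a ++ h :: c ∧ p h = true ∧ ∀ l ∈ a, p l = false := by
  intro xs
  induction xs with
  | nil => intro a h c hsome; simp [split1] at hsome
  | cons x xs ih =>
    intro a h c hsome
    simp only [split1] at hsome
    cases hpx : p x with
    | true =>
      rw [hpx] at hsome
      simp only [if_true, Option.some_inj] at hsome
      obtain ⟨rfl, rfl, rfl⟩ := Prod.mk.injEq .. ▸ (by simpa [Prod.ext_iff] using hsome :
        [] = a ∧ x = h ∧ xs = c)
      exact ⟨rfl, hpx, by intro l hl; cases hl⟩
    | false =>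
      rw [hpx] at hsome
      simp only [Bool.false_eq_true, if_false, Option.map_eq_some_iff] at hsome
      obtain ⟨⟨a', h', c'⟩, hs, heq⟩ := hsome
      obtain ⟨rfl, rfl, rfl⟩ : x :: a' = a ∧ h' = h ∧ c' = c := by simpa [Prod.ext_iff] using heq
      obtain ⟨hx1, hx2, hx3⟩ := ih hs
      refine ⟨by simp [hx1], hx2, ?_⟩
      intro l hl
      rcases List.mem_cons.mp hl with rfl | hl
      · exact hpx
      · exact hx3 l hl

theorem getD_append_length : ∀ (pre : List String) (x : String) (rest : List String) (d : String),
    (pre ++ x :: rest).getD pre.length d = x := by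
  intro pre
  induction pre with
  | nil => intro x rest d; rfl
  | cons y pre ih => intro x rest d; simpa using ih x rest d

theorem set_append_length : ∀ (pre : List String) (x : String) (rest : List String) (y : String),
    (pre ++ x :: rest).set pre.length y = pre ++ y :: rest := by
  intro pre
  induction pre with
  | nil => intro x rest y; rfl
  | cons z pre ih => intro x rest y; simp [ih]

theorem fsFirst_none {header : String} : ∀ {xs : List String}, (∀ l ∈ xs, (PySem.Str.strip l == header) = false) →
    ∀ i, fsFirst xs header i = none := by
  intro xs
  induction xs with
  | nil => intro _ i; rfl
  | cons x xs ih =>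
    intro hall i
    simp only [fsFirst]
    rw [hall x (by simp)]
    exact ih (fun l hl => hall l (by simp [hl])) (i + 1)

theorem fsFirst_found {header : String} : ∀ {pre : List String} {h : String} {xs : List String},
    (∀ l ∈ pre, (PySem.Str.strip l == header) = false) → (PySem.Str.strip h == header) = true →
    ∀ i, fsFirst (pre ++ h :: xs) header i = some (i + pre.length) := by
  intro pre
  induction pre with
  | nil => intro h xs _ hh i; simp [fsFirst, hh]
  | cons x pre ih =>
    intro h xs hall hh i
    simp only [List.cons_append, fsFirst]
    rw [hall x (by simp)]
    simp only [Bool.false_eq_true, if_false]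
    rw [ih (fun l hl => hall l (by simp [hl])) hh (i + 1)]
    congr 1
    simp
    omega

theorem fsEnd_none : ∀ (xs pre : List String),
    (∀ l ∈ xs, (PySem.Str.startswith l "[" && PySem.Str.endswith l "]") = false) →
    fsEnd (pre ++ xs) pre.length = none := by
  intro xs
  induction xs with
  | nil =>
    intro pre _
    rw [fsEnd]
    simp
  | cons x xs ih =>
    intro pre hall
    rw [fsEnd]
    have hlt : pre.length < (pre ++ x :: xs).length := by simp
    rw [dif_pos hlt, getD_append_length]
    rw [hall x (by simp)]
    simp only [Bool.false_eq_true, if_false]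
    have := ih (pre ++ [x]) (fun l hl => hall l (by simp [hl]))
    rw [show pre ++ [x] ++ xs = pre ++ x :: xs by simp] at this
    convert this using 2
    simp

theorem fsEnd_found : ∀ (seg pre : List String) (r : String) (rest : List String),
    (∀ l ∈ seg, (PySem.Str.startswith l "[" && PySem.Str.endswith l "]") = false) →
    (PySem.Str.startswith r "[" && PySem.Str.endswith r "]") = true →
    fsEnd (pre ++ seg ++ r :: rest) pre.length = some (pre.length + seg.length) := by
  intro seg
  induction seg with
  | nil =>
    intro pre r rest _ hr
    rw [fsEnd]
    have hlt : pre.length < (pre ++ [] ++ r :: rest).length := by simp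
    rw [dif_pos hlt]
    simp only [List.append_nil]
    rw [getD_append_length, hr]
    simp
  | cons x seg ih =>
    intro pre r rest hall hr
    rw [fsEnd]
    have hlt : pre.length < (pre ++ x :: seg ++ r :: rest).length := by simp
    rw [dif_pos hlt]
    have hx : (pre ++ (x :: seg) ++ r :: rest).getD pre.length "" = x := by
      have := getD_append_length pre x (seg ++ r :: rest) ""
      simpa using this
    rw [hx, hall x (by simp)]
    simp only [Bool.false_eq_true, if_false]
    have := ih (pre ++ [x]) r rest (fun l hl => hall l (by simp [hl])) hr
    rw [show pre ++ [x] ++ seg ++ r :: rest = pre ++ x :: seg ++ r :: rest by simp] at this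
    convert this using 2
    · simp
    · simp
      omega

theorem ekScan_none : ∀ (seg pre tail : List String) (kp kv : String),
    (∀ l ∈ seg, PySem.Str.startswith (PySem.Str.strip l) kp = false) →
    ekScan (pre ++ seg ++ tail) kp kv pre.length (pre.length + seg.length) = none := by
  intro seg
  induction seg with
  | nil =>
    intro pre tail kp kv _
    rw [ekScan]
    simp
  | cons x seg ih =>
    intro pre tail kp kv hall
    rw [ekScan]
    have hlt : pre.length < pre.length + (x :: seg).length := by simp
    rw [dif_pos hlt]
    have hx : (pre ++ (x :: seg) ++ tail).getD pre.length "" = x := by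
      have := getD_append_length pre x (seg ++ tail) ""
      simpa using this
    rw [hx, hall x (by simp)]
    simp only [Bool.false_eq_true, if_false]
    have := ih (pre ++ [x]) tail kp kv (fun l hl => hall l (by simp [hl]))
    rw [show pre ++ [x] ++ seg ++ tail = pre ++ x :: seg ++ tail by simp] at this
    convert this using 2
    · simp
    · simp
      omega

theorem ekScan_found : ∀ (a pre : List String) (m : String) (c tail : List String) (kp kv : String),
    (∀ l ∈ a, PySem.Str.startswith (PySem.Str.strip l) kp = false) →
    PySem.Str.startswith (PySem.Str.strip m) kp = true →
    ekScan (pre ++ (a ++ m :: c) ++ tail) kp kv pre.length (pre.length + (a.length + 1 + c.length)) =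
      some (pre ++ a ++ kv :: c ++ tail) := by
  intro a
  induction a with
  | nil =>
    intro pre m c tail kp kv _ hm
    rw [ekScan]
    have hlt : pre.length < pre.length + (([] : List String).length + 1 + c.length) := by simp
    rw [dif_pos hlt]
    have hx : (pre ++ ([] ++ m :: c) ++ tail).getD pre.length "" = m := by
      have := getD_append_length pre m (c ++ tail) ""
      simpa using this
    rw [hx, hm]
    simp only [if_true]
    have := set_append_length pre m (c ++ tail) kv
    simp only [List.nil_append]
    rw [show pre ++ m :: c ++ tail = pre ++ m :: (c ++ tail) by simp, this]
    simp
  | cons x a ih =>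
    intro pre m c tail kp kv hall hm
    rw [ekScan]
    have hlt : pre.length < pre.length + ((x :: a).length + 1 + c.length) := by simp
    rw [dif_pos hlt]
    have hx : (pre ++ ((x :: a) ++ m :: c) ++ tail).getD pre.length "" = x := by
      have := getD_append_length pre x (a ++ m :: c ++ tail) ""
      simpa using this
    rw [hx, hall x (by simp)]
    simp only [Bool.false_eq_true, if_false]
    have := ih (pre ++ [x]) m c tail kp kv (fun l hl => hall l (by simp [hl])) hm
    rw [show pre ++ [x] ++ (a ++ m :: c) ++ tail = pre ++ (x :: a ++ m :: c) ++ tail by simp] at this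
    rw [show pre ++ [x] ++ a ++ kv :: c ++ tail = pre ++ x :: a ++ kv :: c ++ tail by simp] at this
    convert this using 2
    · simp
    · simp
      omega

theorem bGo_skip_false {header kp kv : String} : ∀ (pre xs : List String),
    (∀ l ∈ pre, (PySem.Str.strip l == header) = false) →
    bGo (pre ++ xs) header kp kv false =
      match bGo xs header kp kv false with
      | Sum.inl r => Sum.inl (pre ++ r)
      | Sum.inr f => Sum.inr f := by
  intro pre
  induction pre with
  | nil => intro xs _; simp; cases bGo xs header kp kv false <;> rfl
  | cons x pre ih =>
    intro xs hall
    simp only [List.cons_append, bGo, Bool.false_eq_true, if_false]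
    rw [hall x (by simp)]
    simp only [Bool.false_eq_true, if_false]
    rw [ih xs (fun l hl => hall l (by simp [hl]))]
    cases bGo xs header kp kv false <;> simp

theorem bGo_skip_true {header kp kv : String} : ∀ (seg xs : List String),
    (∀ l ∈ seg, (PySem.Str.startswith l "[" && PySem.Str.endswith l "]") = false ∧
                PySem.Str.startswith (PySem.Str.strip l) kp = false) →
    bGo (seg ++ xs) header kp kv true =
      match bGo xs header kp kv true with
      | Sum.inl r => Sum.inl (seg ++ r)
      | Sum.inr f => Sum.inr f := by
  intro seg
  induction seg with
  | nil => intro xs _; simp; cases bGo xs header kp kv true <;> rfl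
  | cons x seg ih =>
    intro xs hall
    simp only [List.cons_append, bGo, if_true]
    rw [(hall x (by simp)).1, (hall x (by simp)).2]
    simp only [Bool.false_eq_true, if_false]
    rw [ih xs (fun l hl => hall l (by simp [hl]))]
    cases bGo xs header kp kv true <;> simp

theorem bGo_header {header kp kv : String} {h : String} (xs : List String)
    (hh : (PySem.Str.strip h == header) = true) :
    bGo (h :: xs) header kp kv false =
      match bGo xs header kp kv true with
      | Sum.inl r => Sum.inl (h :: r)
      | Sum.inr f => Sum.inr f := by
  simp only [bGo, Bool.false_eq_true, if_false, hh, if_true]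

set_option maxHeartbeats 1000000 in
-- main equality
theorem ensure_key_eq_alt (lines : List String) (section_ : String) (key : String) (value : String) :
    ensure_key lines section_ key value = ensure_key_alt lines section_ key value := by
  rcases hsp : split1 (fun l => PySem.Str.strip l == ("[" ++ section_ ++ "]")) lines with _ | ⟨pre, h, xs⟩
  · -- no header line: both take the append branch
    have hall := split1_none hsp
    have hA : fsFirst lines ("[" ++ section_ ++ "]") 0 = none := fsFirst_none (fun l hl => hall l hl) 0
    have hB : bGo lines ("[" ++ section_ ++ "]") (key ++ "=") ((key ++ "=") ++ value) false = Sum.inr false := by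
      have := bGo_skip_false (header := "[" ++ section_ ++ "]") (kp := key ++ "=") (kv := (key ++ "=") ++ value) lines []
        (fun l hl => hall l hl)
      simpa [bGo] using this
    simp only [ensure_key, ensure_key_alt, find_section]
    simp only [hA, hB]
    norm_num
  · obtain ⟨hlines, hh, hpre⟩ := split1_some hsp
    have hstart : fsFirst lines ("[" ++ section_ ++ "]") 0 = some pre.length := by
      rw [hlines]; simpa using fsFirst_found (fun l hl => hpre l hl) hh 0
    -- now split xs at the first raw bracket line
    rcases hq : split1 (fun l => PySem.Str.startswith l "[" && PySem.Str.endswith l "]") xs with _ | ⟨seg, r, rest⟩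
    · -- no closing bracket: section_end = len(lines)
      have hqall := split1_none hq
      have hend : fsEnd lines (pre.length + 1) = none := by
        have := fsEnd_none xs (pre ++ [h]) (fun l hl => hqall l hl)
        rw [show pre ++ [h] ++ xs = pre ++ h :: xs by simp] at this
        rw [hlines]
        convert this using 2
        simp
      rcases hk : split1 (fun l => PySem.Str.startswith (PySem.Str.strip l) (key ++ "=")) xs with _ | ⟨a, m, c⟩
      · -- key not present anywhere after the header: insert at len(lines) = append
        have hkall := split1_none hk
        have hscan : ekScan lines (key ++ "=") ((key ++ "=") ++ value) (pre.length + 1) lines.length = none := by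
          have := ekScan_none xs (pre ++ [h]) [] (key ++ "=") ((key ++ "=") ++ value) (fun l hl => hkall l hl)
          rw [show pre ++ [h] ++ xs ++ [] = pre ++ h :: xs by simp] at this
          rw [hlines]
          convert this using 2 <;> (simp; try omega)
        have hBxs : bGo xs ("[" ++ section_ ++ "]") (key ++ "=") ((key ++ "=") ++ value) true = Sum.inr true := by
          have := bGo_skip_true (header := "[" ++ section_ ++ "]") (kp := key ++ "=") (kv := (key ++ "=") ++ value) xs []
            (fun l hl => ⟨hqall l hl, hkall l hl⟩)
          simpa [bGo] using this
        have hB : bGo lines ("[" ++ section_ ++ "]") (key ++ "=") ((key ++ "=") ++ value) false = Sum.inr true := by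
          rw [hlines, bGo_skip_false pre (h :: xs) (fun l hl => hpre l hl), bGo_header xs hh, hBxs]
        simp only [ensure_key, ensure_key_alt, find_section, hstart, hB]
        rw [if_neg (show ¬((pre.length : Int) = -1) by omega)]
        rw [if_pos (show (0:Int) ≤ (pre.length : Int) by omega)]
        simp only [Int.toNat_natCast, hend, hscan]
        exact PySem.List.insert_length lines _
      · -- key present: overwrite it in place
        obtain ⟨hxs, hm, ha⟩ := split1_some hk
        have hscan : ekScan lines (key ++ "=") ((key ++ "=") ++ value) (pre.length + 1) lines.length =
            some (pre ++ h :: (a ++ ((key ++ "=") ++ value) :: c)) := by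
          have := ekScan_found a (pre ++ [h]) m c [] (key ++ "=") ((key ++ "=") ++ value) (fun l hl => ha l hl) hm
          rw [show pre ++ [h] ++ (a ++ m :: c) ++ [] = pre ++ h :: (a ++ m :: c) by simp] at this
          rw [show pre ++ [h] ++ a ++ ((key ++ "=") ++ value) :: c ++ [] = pre ++ h :: (a ++ ((key ++ "=") ++ value) :: c) by simp] at this
          rw [hlines, hxs]
          convert this using 2 <;> (simp; try omega)
        have hBxs : bGo xs ("[" ++ section_ ++ "]") (key ++ "=") ((key ++ "=") ++ value) true = Sum.inl (a ++ ((key ++ "=") ++ value) :: c) := by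
          rw [hxs]
          rw [bGo_skip_true a (m :: c)
            (fun l hl => ⟨hqall l (by rw [hxs]; simp [hl]), ha l hl⟩)]
          have hmq : (PySem.Str.startswith m "[" && PySem.Str.endswith m "]") = false :=
            hqall m (by rw [hxs]; simp)
          simp only [bGo, if_true, hmq, Bool.false_eq_true, if_false, hm]
        have hB : bGo lines ("[" ++ section_ ++ "]") (key ++ "=") ((key ++ "=") ++ value) false =
            Sum.inl (pre ++ h :: (a ++ ((key ++ "=") ++ value) :: c)) := by
          rw [hlines, bGo_skip_false pre (h :: xs) (fun l hl => hpre l hl), bGo_header xs hh, hBxs]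
        simp only [ensure_key, ensure_key_alt, find_section, hstart, hB]
        rw [if_neg (show ¬((pre.length : Int) = -1) by omega)]
        rw [if_pos (show (0:Int) ≤ (pre.length : Int) by omega)]
        simp only [Int.toNat_natCast, hend, hscan]
    · -- closing bracket present
      obtain ⟨hxs, hr, hseg⟩ := split1_some hq
      have hend : fsEnd lines (pre.length + 1) = some (pre.length + 1 + seg.length) := by
        have := fsEnd_found seg (pre ++ [h]) r rest (fun l hl => hseg l hl) hr
        rw [show pre ++ [h] ++ seg ++ r :: rest = pre ++ h :: (seg ++ r :: rest) by simp] at this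
        rw [hlines, hxs]
        convert this using 2 <;> (simp; try omega)
      rcases hk : split1 (fun l => PySem.Str.startswith (PySem.Str.strip l) (key ++ "=")) seg with _ | ⟨a, m, c⟩
      · -- key not in the section: insert right before the bracket line
        have hkall := split1_none hk
        have hscan : ekScan lines (key ++ "=") ((key ++ "=") ++ value) (pre.length + 1) (pre.length + 1 + seg.length) = none := by
          have := ekScan_none seg (pre ++ [h]) (r :: rest) (key ++ "=") ((key ++ "=") ++ value) (fun l hl => hkall l hl)
          rw [show pre ++ [h] ++ seg ++ r :: rest = pre ++ h :: (seg ++ r :: rest) by simp] at this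
          rw [hlines, hxs]
          convert this using 2 <;> (simp; try omega)
        have hBxs : bGo xs ("[" ++ section_ ++ "]") (key ++ "=") ((key ++ "=") ++ value) true = Sum.inl (seg ++ ((key ++ "=") ++ value) :: r :: rest) := by
          rw [hxs, bGo_skip_true seg (r :: rest) (fun l hl => ⟨hseg l hl, hkall l hl⟩)]
          simp only [bGo, if_true, hr]
        have hB : bGo lines ("[" ++ section_ ++ "]") (key ++ "=") ((key ++ "=") ++ value) false = Sum.inl (pre ++ h :: (seg ++ ((key ++ "=") ++ value) :: r :: rest)) := by
          rw [hlines, bGo_skip_false pre (h :: xs) (fun l hl => hpre l hl), bGo_header xs hh, hBxs]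
        simp only [ensure_key, ensure_key_alt, find_section, hstart, hB]
        rw [if_neg (show ¬((pre.length : Int) = -1) by omega)]
        rw [if_pos (show (0:Int) ≤ (pre.length : Int) by omega)]
        simp only [Int.toNat_natCast, hend, hscan]
        have hle : pre.length + 1 + seg.length ≤ lines.length := by
          rw [hlines, hxs]; simp; omega
        rw [PySem.List.insert_natCast lines (pre.length + 1 + seg.length) ((key ++ "=") ++ value) hle]
        have htake : lines.take (pre.length + 1 + seg.length) = pre ++ h :: seg := by
          rw [hlines, hxs]
          rw [show pre ++ h :: (seg ++ r :: rest) = (pre ++ h :: seg) ++ r :: rest by simp]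
          rw [show pre.length + 1 + seg.length = (pre ++ h :: seg).length by simp <;> omega]
          exact List.take_left
        have hdrop : lines.drop (pre.length + 1 + seg.length) = r :: rest := by
          rw [hlines, hxs]
          rw [show pre ++ h :: (seg ++ r :: rest) = (pre ++ h :: seg) ++ r :: rest by simp]
          rw [show pre.length + 1 + seg.length = (pre ++ h :: seg).length by simp <;> omega]
          exact List.drop_left
        rw [htake, hdrop]
        simp
      · -- key inside the section: overwrite it in place
        obtain ⟨hsegsplit, hm, ha⟩ := split1_some hk
        have hscan : ekScan lines (key ++ "=") ((key ++ "=") ++ value) (pre.length + 1) (pre.length + 1 + seg.length) =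
            some (pre ++ h :: (a ++ ((key ++ "=") ++ value) :: (c ++ r :: rest))) := by
          have := ekScan_found a (pre ++ [h]) m c (r :: rest) (key ++ "=") ((key ++ "=") ++ value) (fun l hl => ha l hl) hm
          rw [show pre ++ [h] ++ (a ++ m :: c) ++ r :: rest = pre ++ h :: (a ++ m :: c ++ r :: rest) by simp] at this
          rw [show pre ++ [h] ++ a ++ ((key ++ "=") ++ value) :: c ++ r :: rest = pre ++ h :: (a ++ ((key ++ "=") ++ value) :: (c ++ r :: rest)) by simp] at this
          rw [hlines, hxs, hsegsplit]
          convert this using 2 <;> (simp; try omega)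
        have hBxs : bGo xs ("[" ++ section_ ++ "]") (key ++ "=") ((key ++ "=") ++ value) true = Sum.inl (a ++ ((key ++ "=") ++ value) :: (c ++ r :: rest)) := by
          rw [hxs, hsegsplit]
          rw [show (a ++ m :: c) ++ r :: rest = a ++ m :: (c ++ r :: rest) by simp]
          rw [bGo_skip_true a (m :: (c ++ r :: rest))
            (fun l hl => ⟨hseg l (by rw [hsegsplit]; simp [hl]), ha l hl⟩)]
          have hmq : (PySem.Str.startswith m "[" && PySem.Str.endswith m "]") = false :=
            hseg m (by rw [hsegsplit]; simp)
          simp only [bGo, if_true, hmq, Bool.false_eq_true, if_false, hm]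
        have hB : bGo lines ("[" ++ section_ ++ "]") (key ++ "=") ((key ++ "=") ++ value) false =
            Sum.inl (pre ++ h :: (a ++ ((key ++ "=") ++ value) :: (c ++ r :: rest))) := by
          rw [hlines, bGo_skip_false pre (h :: xs) (fun l hl => hpre l hl), bGo_header xs hh, hBxs]
        simp only [ensure_key, ensure_key_alt, find_section, hstart, hB]
        rw [if_neg (show ¬((pre.length : Int) = -1) by omega)]
        rw [if_pos (show (0:Int) ≤ (pre.length : Int) by omega)]
        simp only [Int.toNat_natCast, hend, hscan]

-- ===== VERDICT (by name: the statement is the Claim_ definition above) =====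
theorem ensure_key_spec : Claim_equal_ensure_key := by
  intro lines section_ key value _dom
  unfold Spec_ensure_key
  exact ensure_key_eq_alt lines section_ key value
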